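-- pv_equiv track=rewrite | github.com/losa201/Xorb | xorb_core/autonomous/phase11_components.py | _check_strategy_conflict
-- ===== SOURCE A (Python) =====
-- from typing import Dict, List, Any, Optional, Tuple, Set, Callable
--
-- def _check_strategy_conflict(response1: Dict, response2: Dict) -> bool:
--     """Check for strategy conflicts between responses"""
--     # Example: Check if response strategies are incompatible
--     strategy1 = response1.get('strategy', '')
--     strategy2 = response2.get('strategy', '')
--
--     incompatible_pairs = [
--         ('aggressive', 'stealth'),
--         ('immediate', 'delayed'),
--         ('isolation', 'monitoring')
--     ]
--
--     for s1, s2 in incompatible_pairs: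
--         if (strategy1 == s1 and strategy2 == s2) or (strategy1 == s2 and strategy2 == s1):
--             return True
--
--     return False
-- ===== SOURCE B (Python) =====
-- # Classify each strategy independently into a (conflict-group, role) code,
-- # then conflict iff both are coded, in the same group, with opposite roles.
-- _CODE = {
--     'aggressive': (0, 0), 'stealth':    (0, 1),
--     'immediate':  (1, 0), 'delayed':    (1, 1),
--     'isolation':  (2, 0), 'monitoring': (2, 1),
-- }
--
--
-- def _check_strategy_conflict(response1, response2) -> bool:
--     c1 = _CODE.get(response1.get('strategy', ''))
--     c2 = _CODE.get(response2.get('strategy', ''))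
--     return c1 is not None and c2 is not None and c1[0] == c2[0] and c1[1] != c2[1]
-- ===== Notes on version B (the rewrite author's own statement) =====
-- stated objective: alternative
-- what changed: Instead of scanning the list of incompatible pairs and testing both orders, B classifies each strategy string independently into a (conflict-group, role) code via one lookup table and declares a conflict iff both codes exist, share a group, and have opposite roles.
import Mathlib
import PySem

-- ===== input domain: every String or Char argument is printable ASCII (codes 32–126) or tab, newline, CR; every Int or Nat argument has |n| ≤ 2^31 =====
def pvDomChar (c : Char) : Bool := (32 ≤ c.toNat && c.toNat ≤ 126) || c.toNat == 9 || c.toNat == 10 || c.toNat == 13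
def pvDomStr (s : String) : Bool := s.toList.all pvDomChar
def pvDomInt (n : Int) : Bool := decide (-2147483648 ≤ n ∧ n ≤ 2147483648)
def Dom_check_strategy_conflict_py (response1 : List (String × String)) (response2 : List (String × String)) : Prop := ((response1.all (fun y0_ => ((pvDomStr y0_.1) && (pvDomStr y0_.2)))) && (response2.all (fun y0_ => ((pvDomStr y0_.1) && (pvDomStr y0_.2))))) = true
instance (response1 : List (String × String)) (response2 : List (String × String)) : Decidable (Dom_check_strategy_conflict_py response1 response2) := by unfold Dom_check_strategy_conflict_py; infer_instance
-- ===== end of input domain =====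

-- B replaces A's scan of the incompatible-pair list (with its two-way equality test) by
-- classifying each strategy independently into a (conflict-group, role) code via one
-- lookup table and comparing the two codes (objective: alternative; same cost).

-- ===== PORT A =====
-- the literal 'incompatible_pairs' list from A
def cscPairs : List (String × String) :=
  [("aggressive", "stealth"), ("immediate", "delayed"), ("isolation", "monitoring")]

-- the 'for s1, s2 in incompatible_pairs: if … return True' loop; falls through to False
def cscLoop (strategy1 strategy2 : String) : List (String × String) → Bool
  | [] => false
  | (s1, s2) :: rest =>
    if (strategy1 == s1 && strategy2 == s2) || (strategy1 == s2 && strategy2 == s1) then true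
    else cscLoop strategy1 strategy2 rest

def check_strategy_conflict_py (response1 : List (String × String)) (response2 : List (String × String)) : Bool :=
  let strategy1 := PySem.Dict.getD ⟨response1⟩ "strategy" ""
  let strategy2 := PySem.Dict.getD ⟨response2⟩ "strategy" ""
  cscLoop strategy1 strategy2 cscPairs

-- ===== PORT B =====
-- the _CODE table: strategy → (conflict-group, role)
def cscCode : PySem.Dict String (Int × Int) :=
  ⟨[("aggressive", (0, 0)), ("stealth", (0, 1)),
    ("immediate", (1, 0)), ("delayed", (1, 1)),
    ("isolation", (2, 0)), ("monitoring", (2, 1))]⟩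

def check_strategy_conflict_py_alt (response1 : List (String × String)) (response2 : List (String × String)) : Bool :=
  let c1 := PySem.Dict.get? cscCode (PySem.Dict.getD ⟨response1⟩ "strategy" "")
  let c2 := PySem.Dict.get? cscCode (PySem.Dict.getD ⟨response2⟩ "strategy" "")
  -- 'c1 is not None and c2 is not None and c1[0] == c2[0] and c1[1] != c2[1]'
  match c1, c2 with
  | some p1, some p2 => p1.1 == p2.1 && p1.2 != p2.2
  | _, _ => false

-- ===== PRECONDITION & SPEC =====
def Spec_check_strategy_conflict_py (response1 : List (String × String)) (response2 : List (String × String)) (out : Bool) : Prop := out = check_strategy_conflict_py_alt response1 response2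
instance (response1 : List (String × String)) (response2 : List (String × String)) (out : Bool) : Decidable (Spec_check_strategy_conflict_py response1 response2 out) := by unfold Spec_check_strategy_conflict_py; infer_instance

-- ===== CLAIM =====
def Claim_equal_check_strategy_conflict_py : Prop := ∀ (response1 : List (String × String)) (response2 : List (String × String)), Dom_check_strategy_conflict_py response1 response2 → Spec_check_strategy_conflict_py response1 response2 (check_strategy_conflict_py response1 response2)

-- ===== LEMMAS AND PROOFS =====

-- the six-entry _CODE table as an explicit if-chain of key comparisons
theorem lookup_chain (a : String) : PySem.Dict.get? cscCode a =
    (if "aggressive" == a then some ((0:Int),(0:Int)) else if "stealth" == a then some (0,1)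
     else if "immediate" == a then some (1,0) else if "delayed" == a then some (1,1)
     else if "isolation" == a then some (2,0) else if "monitoring" == a then some (2,1) else none) := by
  simp only [cscCode, PySem.Dict.get?, List.find?]
  split_ifs <;> simp_all [beq_eq_decide]

-- the two cores agree on every pair of strategy strings
set_option maxHeartbeats 2000000 in
theorem csc_core (a b : String) :
    cscLoop a b cscPairs
      = (match PySem.Dict.get? cscCode a, PySem.Dict.get? cscCode b with
         | some p1, some p2 => p1.1 == p2.1 && p1.2 != p2.2
         | _, _ => false) := by
  rw [lookup_chain a, lookup_chain b]
  have L : cscLoop a b cscPairs =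
      ((a == "aggressive" && b == "stealth") || (a == "stealth" && b == "aggressive") ||
       (a == "immediate" && b == "delayed") || (a == "delayed" && b == "immediate") ||
       (a == "isolation" && b == "monitoring") || (a == "monitoring" && b == "isolation")) := by
    simp only [cscLoop, cscPairs]
    split_ifs <;> simp_all <;> tauto
  rw [L]; clear L
  split_ifs <;> simp_all [beq_eq_decide, eq_comm]

-- ===== VERDICT =====
theorem check_strategy_conflict_py_spec : Claim_equal_check_strategy_conflict_py := by
  intro response1 response2 _
  unfold Spec_check_strategy_conflict_py check_strategy_conflict_py check_strategy_conflict_py_alt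
  exact csc_core _ _
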